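-- pv_equiv track=rewrite | github.com/yesonsys03-web/VibeLign | vibelign/core/work_memory.py | _prune_relevant_files
-- ===== SOURCE A (Python) =====
-- from typing import TypedDict, cast
--
-- MAX_RELEVANT_FILES = 10
--
-- MAX_TEXT_LENGTH = 400
--
-- class RelevantFileEntry(TypedDict, total=False):
--     path: str
--     why: str
--     # v2.0.37: "explicit" (transfer_set_relevant) vs "watch" (mcp_dispatch capture).
--     # 핸드오프 Relevant files 섹션은 "explicit" 만 노출. legacy entry 는 "watch" 로 fallback.
--     source: str
--
-- def _truncate_text(value: object, limit: int = MAX_TEXT_LENGTH) -> str: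
--     if not isinstance(value, str):
--         return ""
--     text = " ".join(value.split())
--     if len(text) <= limit:
--         return text
--     return text[: limit - 1].rstrip() + "…"
--
-- def _prune_relevant_files(entries: list[RelevantFileEntry]) -> list[RelevantFileEntry]:
--     deduped: list[RelevantFileEntry] = []
--     seen: set[str] = set()
--     for entry in reversed(entries):
--         path = entry.get("path", "")
--         if not path or path in seen:
--             continue
--         seen.add(path)
--         source_raw = entry.get("source", "watch")
--         source = source_raw if source_raw in ("explicit", "watch") else "watch"
--         deduped.append(
--             {
--                 "path": _truncate_text(path, 200),
--                 "why": _truncate_text(entry.get("why", "")),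
--                 "source": source,
--             }
--         )
--         if len(deduped) >= MAX_RELEVANT_FILES:
--             break
--     deduped.reverse()
--     return deduped
-- ===== SOURCE B (Python) =====
-- MAX_RELEVANT_FILES = 10
--
-- MAX_TEXT_LENGTH = 400
--
--
-- def _truncate_text(value: object, limit: int = MAX_TEXT_LENGTH) -> str:
--     if not isinstance(value, str):
--         return ""
--     text = " ".join(value.split())
--     if len(text) <= limit:
--         return text
--     return text[: limit - 1].rstrip() + "…"
--
--
-- def _prune_relevant_files(entries):
--     # Forward pass: insertion-ordered dict keyed by path, moving repeats to the end.
--     od = {}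
--     for entry in entries:
--         path = entry.get("path", "")
--         if not path:
--             continue
--         od.pop(path, None)
--         od[path] = entry
--     # Keep the MAX_RELEVANT_FILES most recent distinct paths, oldest first, normalized.
--     result = []
--     for path, entry in list(od.items())[-MAX_RELEVANT_FILES:]:
--         source_raw = entry.get("source", "watch")
--         source = source_raw if source_raw in ("explicit", "watch") else "watch"
--         result.append(
--             {
--                 "path": _truncate_text(path, 200),
--                 "why": _truncate_text(entry.get("why", "")),
--                 "source": source,
--             }
--         )
--     return result
-- ===== Notes on version B (the rewrite author's own statement) =====
-- stated objective: idiomatic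
-- what changed: Replaces the reverse scan with a seen-set and early break by a forward pass over a move-to-end insertion-ordered dict keyed by path, followed by a [-10:] slice and a separate normalization pass.
import Mathlib
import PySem

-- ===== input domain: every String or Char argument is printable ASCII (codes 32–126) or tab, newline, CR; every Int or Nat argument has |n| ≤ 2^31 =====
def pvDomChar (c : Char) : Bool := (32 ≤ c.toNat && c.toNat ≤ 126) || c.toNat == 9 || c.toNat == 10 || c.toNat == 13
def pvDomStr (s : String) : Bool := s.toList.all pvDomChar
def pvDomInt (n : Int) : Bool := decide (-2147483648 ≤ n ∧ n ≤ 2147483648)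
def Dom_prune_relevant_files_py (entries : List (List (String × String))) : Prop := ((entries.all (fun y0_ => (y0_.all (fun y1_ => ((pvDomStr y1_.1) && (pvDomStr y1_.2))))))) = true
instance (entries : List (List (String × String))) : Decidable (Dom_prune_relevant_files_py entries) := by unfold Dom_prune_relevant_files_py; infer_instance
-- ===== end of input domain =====

-- B replaces A's reverse scan with seen-set and early break by a forward move-to-end
-- dict pass plus a [-10:] slice and a separate normalization pass (objective: idiomatic).

-- ===== PORT A =====
-- shared module helper _truncate_text (identical in Source A and Source B)
def pvTruncateText (value : String) (limit : Int) : String :=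
  let text := PySem.Str.join " " (PySem.Str.split₀ value)
  if PySem.Str.len text ≤ limit then text
  else PySem.Str.rstrip (PySem.Str.slice text none (some (limit - 1))) ++ "…"

-- entry.get(k, dflt) on the entry dict (assoc list, first match)
def pvGetD (entry : List (String × String)) (k dflt : String) : String :=
  (PySem.Dict.mk entry).getD k dflt

-- the for-loop over reversed(entries) with state (deduped, seen) and the len>=10 break
def pruneLoopA : List (List (String × String)) → List (List (String × String)) →
    PySem.Set String → List (List (String × String))
  | [], deduped, _ => deduped
  | entry :: rest, deduped, seen =>
    let path := pvGetD entry "path" ""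
    if path = "" ∨ PySem.Set.contains seen path then pruneLoopA rest deduped seen
    else
      let seen' := PySem.Set.add seen path
      let source_raw := pvGetD entry "source" "watch"
      let source := if source_raw = "explicit" ∨ source_raw = "watch" then source_raw else "watch"
      let deduped' := deduped ++
        [[("path", pvTruncateText path 200),
          ("why", pvTruncateText (pvGetD entry "why" "") 400),
          ("source", source)]]
      if 10 ≤ deduped'.length then deduped' else pruneLoopA rest deduped' seen'

def prune_relevant_files_py (entries : List (List (String × String))) : List (List (String × String)) :=
  (pruneLoopA entries.reverse [] PySem.Set.empty).reverse

-- ===== PORT B =====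
-- forward pass: od.pop(path, None); od[path] = entry
def pruneDictB (entries : List (List (String × String))) : PySem.Dict String (List (String × String)) :=
  entries.foldl
    (fun od entry =>
      let path := pvGetD entry "path" ""
      if path = "" then od else (od.erase path).insert path entry)
    PySem.Dict.empty

-- body of B's second loop: the normalized dict for one (path, entry) item
def pvNormEntry (pe : String × List (String × String)) : List (String × String) :=
  let source_raw := pvGetD pe.2 "source" "watch"
  let source := if source_raw = "explicit" ∨ source_raw = "watch" then source_raw else "watch"
  [("path", pvTruncateText pe.1 200),
   ("why", pvTruncateText (pvGetD pe.2 "why" "") 400),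
   ("source", source)]

def prune_relevant_files_py_alt (entries : List (List (String × String))) : List (List (String × String)) :=
  (PySem.List.slice (pruneDictB entries).items (some (-10)) none).map pvNormEntry

-- ===== PRECONDITION & SPEC =====
def Spec_prune_relevant_files_py (entries : List (List (String × String))) (out : List (List (String × String))) : Prop := out = prune_relevant_files_py_alt entries
instance (entries : List (List (String × String))) (out : List (List (String × String))) : Decidable (Spec_prune_relevant_files_py entries out) := by unfold Spec_prune_relevant_files_py; infer_instance

-- ===== CLAIM (what is proved, stated in full; the proofs are below) =====
def Claim_equal_prune_relevant_files_py : Prop := ∀ (entries : List (List (String × String))), Dom_prune_relevant_files_py entries → Spec_prune_relevant_files_py entries (prune_relevant_files_py entries)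

-- ===== LEMMAS AND PROOFS =====

-- proof-side: unbounded first-occurrence dedup of (path, entry) pairs, skipping empty/seen paths
def firstAll : List (List (String × String)) → PySem.Set String → List (String × List (String × String))
  | [], _ => []
  | entry :: rest, seen =>
    let path := pvGetD entry "path" ""
    if path = "" ∨ PySem.Set.contains seen path then firstAll rest seen
    else (path, entry) :: firstAll rest (PySem.Set.add seen path)

theorem firstAll_filter (l : List (List (String × String))) (seen : PySem.Set String) :
    firstAll l seen = (firstAll l PySem.Set.empty).filter (fun q => !PySem.Set.contains seen q.1) := by
  induction l generalizing seen with
  | nil => simp [firstAll]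
  | cons e rest ih =>
    simp only [firstAll]
    set p := pvGetD e "path" "" with hp
    by_cases hemp : p = ""
    · simp [hemp, PySem.Set.contains, PySem.Set.empty, ih seen]
    · by_cases hmem : PySem.Set.contains seen p
      · have hmem' : p ∈ seen := by simpa [PySem.Set.contains] using hmem
        have hns : ¬ (p = "" ∨ PySem.Set.contains PySem.Set.empty p = true) := by
          simp [hemp, PySem.Set.contains, PySem.Set.empty]
        rw [if_pos (Or.inr hmem), if_neg hns]
        rw [ih seen, ih (PySem.Set.add PySem.Set.empty p)]
        simp only [List.filter_cons, List.filter_filter]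
        rw [if_neg (by simp [hmem'])]
        apply List.filter_congr
        intro q _
        by_cases hq : q.1 = p
        · simp [hq, hmem']
        · simp [hq, PySem.Set.contains, PySem.Set.empty]
      · have hmem' : p ∉ seen := by simpa [PySem.Set.contains] using hmem
        have hns : ¬ (p = "" ∨ PySem.Set.contains PySem.Set.empty p = true) := by
          simp [hemp, PySem.Set.contains, PySem.Set.empty]
        rw [if_neg (by simp [hemp, hmem']), if_neg hns]
        rw [ih (PySem.Set.add seen p), ih (PySem.Set.add PySem.Set.empty p)]
        simp only [List.filter_cons, List.filter_filter]
        rw [if_pos (by simp [hmem'])]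
        congr 1
        apply List.filter_congr
        intro q _
        by_cases hq : q.1 = p
        · simp [hq, hmem']
        · simp [hq, PySem.Set.contains, PySem.Set.empty]

-- A's loop equals the current accumulator followed by the normalized bounded dedup
theorem pruneLoopA_eq (l : List (List (String × String))) (seen : PySem.Set String)
    (deduped : List (List (String × String))) (h : deduped.length < 10) :
    pruneLoopA l deduped seen =
      deduped ++ ((firstAll l seen).take (10 - deduped.length)).map pvNormEntry := by
  induction l generalizing seen deduped with
  | nil => simp [pruneLoopA, firstAll]
  | cons e rest ih =>
    simp only [pruneLoopA, firstAll]
    by_cases hc : pvGetD e "path" "" = "" ∨ PySem.Set.contains seen (pvGetD e "path" "") = true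
    · rw [if_pos hc, if_pos hc, ih _ _ h]
    · rw [if_neg hc, if_neg hc]
      have hlen : (deduped ++ [pvNormEntry (pvGetD e "path" "", e)]).length = deduped.length + 1 := by
        simp
      by_cases hten : deduped.length + 1 = 10
      · have h10 : 10 ≤ (deduped ++ [pvNormEntry (pvGetD e "path" "", e)]).length := by omega
        rw [show (deduped ++
            [[("path", pvTruncateText (pvGetD e "path" "") 200),
              ("why", pvTruncateText (pvGetD e "why" "") 400),
              ("source",
                if pvGetD e "source" "watch" = "explicit" ∨ pvGetD e "source" "watch" = "watch"
                then pvGetD e "source" "watch" else "watch")]]) =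
            deduped ++ [pvNormEntry (pvGetD e "path" "", e)] from rfl]
        rw [if_pos h10]
        have : 10 - deduped.length = 1 := by omega
        simp [this, pvNormEntry]
      · have h10 : ¬ 10 ≤ (deduped ++ [pvNormEntry (pvGetD e "path" "", e)]).length := by
          rw [hlen]; omega
        rw [show (deduped ++
            [[("path", pvTruncateText (pvGetD e "path" "") 200),
              ("why", pvTruncateText (pvGetD e "why" "") 400),
              ("source",
                if pvGetD e "source" "watch" = "explicit" ∨ pvGetD e "source" "watch" = "watch"
                then pvGetD e "source" "watch" else "watch")]]) =
            deduped ++ [pvNormEntry (pvGetD e "path" "", e)] from rfl]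
        rw [if_neg h10, ih _ _ (by omega)]
        have hslots : 10 - deduped.length = (10 - (deduped.length + 1)) + 1 := by omega
        simp only [hlen, List.append_assoc, List.singleton_append]
        rw [hslots, List.take_succ_cons, List.map_cons]

-- B's dict items are the reversed first-occurrence dedup of the reversed input
theorem pruneDictB_items (entries : List (List (String × String))) :
    (pruneDictB entries).items = (firstAll entries.reverse PySem.Set.empty).reverse := by
  induction entries using List.reverseRecOn with
  | nil => simp [pruneDictB, firstAll, PySem.Dict.empty]
  | append_singleton xs e ih =>
    have hfold : pruneDictB (xs ++ [e]) =
        (let path := pvGetD e "path" ""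
         if path = "" then pruneDictB xs
         else ((pruneDictB xs).erase path).insert path e) := by
      simp [pruneDictB, List.foldl_append]
    rw [hfold]
    simp only [List.reverse_append, List.reverse_singleton, List.singleton_append, firstAll]
    by_cases hemp : pvGetD e "path" "" = ""
    · simpa [hemp] using ih
    · have hns : ¬ (pvGetD e "path" "" = "" ∨
          PySem.Set.contains PySem.Set.empty (pvGetD e "path" "") = true) := by
        simp [hemp, PySem.Set.contains, PySem.Set.empty]
      rw [if_neg hemp, if_neg hns]
      set p := pvGetD e "path" ""
      have herase : ((pruneDictB xs).erase p).items =
          (pruneDictB xs).items.filter (fun q => !(q.1 == p)) := rfl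
      have hcontains : ((pruneDictB xs).erase p).contains p = false := by
        simp [PySem.Dict.contains, herase, List.any_filter]
      have hins : (((pruneDictB xs).erase p).insert p e).items =
          ((pruneDictB xs).erase p).items ++ [(p, e)] := by
        simp [PySem.Dict.insert, hcontains]
      rw [hins, herase, ih, List.reverse_cons]
      rw [firstAll_filter _ (PySem.Set.add PySem.Set.empty p)]
      rw [List.filter_reverse]
      congr 2
      apply List.filter_congr
      intro q _
      by_cases hq : q.1 = p
      · simp [hq]
      · simp [hq, PySem.Set.contains, PySem.Set.empty]

-- drop (len-10) of a reversed list is the reversed take 10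
theorem reverse_drop_take (l : List (String × List (String × String))) :
    l.reverse.drop (l.reverse.length - 10) = (l.take 10).reverse := by
  rw [List.drop_reverse, List.length_reverse]
  by_cases h : l.length ≤ 10
  · rw [Nat.sub_eq_zero_of_le h, Nat.sub_zero, List.take_length, List.take_of_length_le h]
  · congr 2
    omega

-- ===== VERDICT (by name: the statement is the Claim_ definition above) =====
theorem prune_relevant_files_py_spec : Claim_equal_prune_relevant_files_py := by
  intro entries _
  unfold Spec_prune_relevant_files_py
  unfold prune_relevant_files_py prune_relevant_files_py_alt
  rw [pruneLoopA_eq _ _ _ (by simp), pruneDictB_items]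
  rw [PySem.List.slice_from_neg_ofNat _ 10 (by omega)]
  rw [reverse_drop_take]
  simp [List.map_reverse]
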